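-- pv_equiv track=rewrite | github.com/pronabroy360/python-per-day | Recursion/subset_sum2_brute.py | subsetSumBrut
-- ===== SOURCE A (Python) =====
-- from typing import List
--
-- def subsetSumBrut(nums):
--     ans = []
--     res = set()
--
--     def subsetHelper(ind:int, ds:List[int]):
--         if ind == len(nums): #If the ind (current index) is equal to the length of nums, this means we've reached the end of the list and generated a subset.
--             ds.sort() # ensures that any duplicate subsets (in terms of elements) are added to res in the same order, preventing duplicates.
--             res.add(tuple(ds)) #The current subset (ds) is converted into a tuple (tuple(ds)) before adding it to the set res, since sets can only store hashable objects like tuples.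
--             return
--         ds.append(nums[ind]) #(Include nums[ind] in subset):First, nums[ind] is added to ds (i.e., the current subset), and the recursive function is called with ind + 1, moving to the next index.
--         subsetHelper(ind+1, ds) # (Backtrack):After the recursive call, the last element added to ds is removed using ds.pop(), so we can explore the subsets that do not include nums[ind].
--         ds.pop() #(Exclude nums[ind]):After backtracking, we make another recursive call without including nums[ind] to generate the subsets that exclude this element.
--         subsetHelper(ind+1, ds)
--     subsetHelper(0, [])
--     for it in res:
--         ans.append(list(it)) #Each tuple in res is converted back into a list and added to ans, since the final result needs to be in list format.
--     return ans
-- ===== SOURCE B (Python) =====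
-- def subsetSumBrut(nums):
--     # Iterative re-implementation: the recursive backtracking (with its in-place
--     # ds.sort() at each leaf) is replaced by a single loop over an explicit stack
--     # of defunctionalized actions (i >= 0: process index i; -1: backtrack/pop).
--     n = len(nums)
--     ds = []
--     res = set()
--     stack = [0]
--     while stack:
--         act = stack.pop()
--         if act < 0:
--             ds.pop()
--         elif act < n:
--             ds.append(nums[act])
--             stack += [act + 1, -1, act + 1]
--         else:
--             ds.sort()
--             res.add(tuple(ds))
--     return [list(t) for t in res]
-- ===== Notes on version B (the rewrite author's own statement) =====
-- stated objective: alternative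
-- what changed: A's result depends on its exact mutation trace (the in-place ds.sort() at each leaf changes what the later ds.pop() removes), so that trace is kept but the recursion is replaced by a single iterative loop over an explicit stack of defunctionalized actions (index = visit, -1 = backtrack pop), with no recursive calls.
import Mathlib
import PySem

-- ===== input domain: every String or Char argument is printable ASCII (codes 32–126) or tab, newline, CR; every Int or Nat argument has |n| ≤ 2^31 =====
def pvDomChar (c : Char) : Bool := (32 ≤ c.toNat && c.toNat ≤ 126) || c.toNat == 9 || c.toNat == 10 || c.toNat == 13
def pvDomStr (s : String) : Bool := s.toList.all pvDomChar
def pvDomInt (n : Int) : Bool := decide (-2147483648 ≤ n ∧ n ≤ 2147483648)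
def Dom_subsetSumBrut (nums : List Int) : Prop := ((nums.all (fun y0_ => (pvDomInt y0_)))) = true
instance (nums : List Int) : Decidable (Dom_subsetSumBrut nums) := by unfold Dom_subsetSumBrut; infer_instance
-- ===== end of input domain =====

-- B replaces A's recursive backtracking by one iterative loop over an explicit stack of
-- defunctionalized actions (objective: alternative decomposition; same cost). A's exact result
-- (including what it returns on unsorted input, where the in-place ds.sort() at a leaf changes
-- what ds.pop() later removes) is reproduced; the return list's order models the result set's
-- insertion order (the Python set's hash iteration order is not modelled; outputs are compared as sets).

-- ===== PORT A =====
-- subsetHelper(ind, ds): structural recursion on the suffix nums[ind:] (rest = nums[ind:],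
-- so 'ind == len(nums)' is 'rest = []' and 'nums[ind]' is the head of rest); ds is threaded
-- through (Python mutates it in place), the pair carries (ds, res).
def subsetHelperA : List Int → List Int → PySem.Set (List Int) → List Int × PySem.Set (List Int)
  | [], ds, res =>
      let ds' := PySem.List.sorted ds (fun x => x)   -- ds.sort(); res.add(tuple(ds))
      (ds', res.add ds')
  | x :: rs, ds, res =>
      let p := subsetHelperA rs (ds ++ [x]) res      -- ds.append(nums[ind]); subsetHelper(ind+1, ds)
      subsetHelperA rs p.1.dropLast p.2              -- ds.pop(); subsetHelper(ind+1, ds)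

def subsetSumBrut (nums : List Int) : List (List Int) :=
  let p := subsetHelperA nums [] PySem.Set.empty
  p.2.foldl (fun ans it => ans ++ [it]) []           -- for it in res: ans.append(list(it))

-- ===== PORT B =====
-- weight of a pending action, for termination of the stack loop
def pvWB (n : Nat) (a : Int) : Nat := if a < 0 then 1 else if a.toNat < n then 4 ^ (n - a.toNat) else 1

-- the while-loop of Source B; the Lean list's head is the Python stack's top (stack.pop()/append work at the end)
def pvLoopB (nums : List Int) (n : Nat) (stack : List Int) (ds : List Int)
    (res : PySem.Set (List Int)) : PySem.Set (List Int) :=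
  match stack with
  | [] => res
  | act :: rest =>
    if act < 0 then
      pvLoopB nums n rest ds.dropLast res                          -- ds.pop()
    else if _h : act.toNat < n then
      pvLoopB nums n ((act + 1) :: (-1) :: (act + 1) :: rest)      -- stack += [act+1, -1, act+1]
        (ds ++ [PySem.List.pyGetD nums act 0]) res                 -- ds.append(nums[act])
    else
      let ds' := PySem.List.sorted ds (fun x => x)                 -- ds.sort(); res.add(tuple(ds))
      pvLoopB nums n rest ds' (res.add ds')
  termination_by (stack.map (pvWB n)).sum
  decreasing_by
  · simp [pvWB, *]
  · simp only [List.map_cons, List.sum_cons]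
    have hk : act.toNat < n := _h
    have e1 : pvWB n act = 4 ^ (n - act.toNat) := by simp [pvWB, *]
    have e2 : pvWB n (-1) = 1 := by simp [pvWB]
    have e3 : pvWB n (act + 1) ≤ 4 ^ (n - (act.toNat + 1)) := by
      by_cases h2 : (act + 1).toNat < n
      · have h3 : (act + 1).toNat = act.toNat + 1 := by omega
        simp only [pvWB, if_neg (show ¬((act : Int) + 1 < 0) by omega), h3]
        split
        · exact le_refl _
        · exact Nat.one_le_pow _ _ (by omega)
      · simp [pvWB, show ¬((act : Int) + 1 < 0) by omega, h2]
        exact Nat.one_le_pow _ _ (by omega)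
    have e4 : 4 ^ (n - act.toNat) = 4 * 4 ^ (n - (act.toNat + 1)) := by
      rw [← pow_succ']; congr 1; omega
    have e5 : 1 ≤ 4 ^ (n - (act.toNat + 1)) := Nat.one_le_pow _ _ (by omega)
    rw [e1, e2]
    omega
  · simp [pvWB, *]

def subsetSumBrut_alt (nums : List Int) : List (List Int) :=
  let res := pvLoopB nums nums.length [0] [] PySem.Set.empty
  res.map (fun t => t)                                             -- [list(t) for t in res]

-- ===== PRECONDITION & SPEC =====
def Spec_subsetSumBrut (nums : List Int) (out : List (List Int)) : Prop := out = subsetSumBrut_alt nums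
instance (nums : List Int) (out : List (List Int)) : Decidable (Spec_subsetSumBrut nums out) := by unfold Spec_subsetSumBrut; infer_instance

-- ===== CLAIM (what is proved, stated in full; the proofs are below) =====
def Claim_equal_subsetSumBrut : Prop := ∀ (nums : List Int), Dom_subsetSumBrut nums → Spec_subsetSumBrut nums (subsetSumBrut nums)

-- ===== LEMMAS AND PROOFS =====

-- the stack machine simulates one recursive call on the suffix nums[i:]
lemma pvLoopB_sim (nums : List Int) : ∀ (k i : Nat), i + k = nums.length →
    ∀ (stack ds : List Int) (res : PySem.Set (List Int)),
      pvLoopB nums nums.length (((i : Nat) : Int) :: stack) ds res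
        = pvLoopB nums nums.length stack (subsetHelperA (nums.drop i) ds res).1
            (subsetHelperA (nums.drop i) ds res).2 := by
  intro k
  induction k with
  | zero =>
      intro i hi stack ds res
      have hin : i = nums.length := by omega
      rw [pvLoopB]
      simp only [hin, List.drop_length, subsetHelperA]
      have h0 : ¬ (((nums.length : Nat) : Int) < 0) := by omega
      have h1 : ¬ ((((nums.length : Nat) : Int)).toNat < nums.length) := by simp
      simp [h0]
  | succ m ih =>
      intro i hi stack ds res
      have hlt : i < nums.length := by omega
      have hdrop : nums.drop i = nums[i] :: nums.drop (i + 1) := List.drop_eq_getElem_cons hlt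
      rw [pvLoopB]
      have h0 : ¬ (((i : Nat) : Int) < 0) := by omega
      have h1 : (((i : Nat) : Int)).toNat < nums.length := by simpa using hlt
      simp only [h0, if_false, h1, dif_pos]
      have hcast : ((i : Nat) : Int) + 1 = (((i + 1 : Nat)) : Int) := by push_cast; ring
      have hget : PySem.List.pyGetD nums ((i : Nat) : Int) 0 = nums[i] := by
        rw [PySem.List.pyGetD_natCast]; exact List.getD_eq_getElem nums 0 hlt
      rw [hcast, hget, ih (i + 1) (by omega)]
      rw [pvLoopB]
      have hneg : ((-1 : Int) < 0) := by omega
      simp only [hneg, if_pos]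
      rw [ih (i + 1) (by omega)]
      rw [hdrop]
      rfl

-- ===== VERDICT (by name: the statement is the Claim_ definition above) =====
theorem subsetSumBrut_spec : Claim_equal_subsetSumBrut := by
  intro nums _
  unfold Spec_subsetSumBrut subsetSumBrut subsetSumBrut_alt
  have h0 : (0 : Int) = ((0 : Nat) : Int) := by norm_num
  rw [h0, pvLoopB_sim nums nums.length 0 (by omega) [] [] PySem.Set.empty]
  rw [pvLoopB]
  rw [List.drop_zero, PySem.List.foldl_append_singleton_eq_self, List.nil_append, List.map_id']
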